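-- pv_equiv track=rewrite | github.com/farfalan/codeforcesProblemset | B.Dreamoon_and_WiFi.py | getfinalstep
-- ===== SOURCE A (Python) =====
-- def getfinalstep(steps):
--     s = 0
--     for _ in steps:
--         if _ == "+":
--             s += 1
--         elif _ == "-":
--             s -=1
--     return s
-- ===== SOURCE B (Python) =====
-- def getfinalstep(steps):
--     # Divide and conquer: the net sum of a string is the sum of the net sums
--     # of its two halves; base cases are the empty and single-character strings.
--     n = len(steps)
--     if n == 0:
--         return 0
--     if n == 1:
--         return 1 if steps == "+" else (-1 if steps == "-" else 0)
--     mid = n // 2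
--     return getfinalstep(steps[:mid]) + getfinalstep(steps[mid:])
-- ===== Notes on version B (the rewrite author's own statement) =====
-- stated objective: alternative
-- what changed: Replaces the left-to-right running-accumulator loop with a divide-and-conquer recursion: split the string in half, recursively compute each half's net sum and add, with single-character base cases; correct because the tally is associative.
import Mathlib
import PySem

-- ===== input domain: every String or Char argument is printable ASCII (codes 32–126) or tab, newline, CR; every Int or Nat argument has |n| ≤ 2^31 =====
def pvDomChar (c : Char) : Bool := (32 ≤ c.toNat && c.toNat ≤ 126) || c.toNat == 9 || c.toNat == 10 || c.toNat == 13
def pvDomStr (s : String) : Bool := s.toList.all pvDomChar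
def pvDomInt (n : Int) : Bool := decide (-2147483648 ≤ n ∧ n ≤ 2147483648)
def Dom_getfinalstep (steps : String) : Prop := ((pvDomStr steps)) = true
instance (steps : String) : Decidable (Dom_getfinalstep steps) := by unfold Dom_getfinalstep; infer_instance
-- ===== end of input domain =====

-- B replaces A's left-to-right accumulator loop with a divide-and-conquer recursion on string halves (alternative decomposition, same cost).


-- ===== PORT A =====
-- for _ in steps: if _ == "+": s += 1 elif _ == "-": s -= 1
def getfinalstep (steps : String) : Int :=
  steps.toList.foldl (fun s c => if c == '+' then s + 1 else if c == '-' then s - 1 else s) 0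

-- ===== PORT B =====
-- divide and conquer on the character list: split at len//2, recurse on halves, add
def gfsGo : List Char → Int
  | [] => 0
  | [c] => if c == '+' then 1 else if c == '-' then -1 else 0
  | c1 :: c2 :: rest =>
      let l := c1 :: c2 :: rest
      gfsGo (l.take (l.length / 2)) + gfsGo (l.drop (l.length / 2))
  termination_by l => l.length
  decreasing_by
  · simp; omega
  · simp; omega

def getfinalstep_alt (steps : String) : Int := gfsGo steps.toList

-- ===== PRECONDITION & SPEC =====
def Spec_getfinalstep (steps : String) (out : Int) : Prop := out = getfinalstep_alt steps
instance (steps : String) (out : Int) : Decidable (Spec_getfinalstep steps out) := by unfold Spec_getfinalstep; infer_instance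

-- ===== CLAIM (what is proved, stated in full; the proofs are below) =====
def Claim_equal_getfinalstep : Prop := ∀ (steps : String), Dom_getfinalstep steps → Spec_getfinalstep steps (getfinalstep steps)

-- ===== LEMMAS AND PROOFS =====

theorem foldl_pm (l : List Char) (a : Int) :
    l.foldl (fun s c => if c == '+' then s + 1 else if c == '-' then s - 1 else s) a
      = a + (l.count '+' : Int) - (l.count '-' : Int) := by
  induction l generalizing a with
  | nil => simp
  | cons c t ih =>
    rw [List.foldl_cons, ih, List.count_cons, List.count_cons]
    by_cases h1 : c = '+'
    · simp [h1]; ring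
    · by_cases h2 : c = '-'
      · simp [h1, h2]; ring
      · simp [h1, h2]

theorem gfsGo_eq_counts (l : List Char) :
    gfsGo l = (l.count '+' : Int) - (l.count '-' : Int) := by
  induction l using gfsGo.induct with
  | case1 => simp [gfsGo]
  | case2 c h =>
    have hc : c = '+' := by simpa using h
    subst hc; simp [gfsGo, List.count_singleton]
  | case3 c h1 h2 =>
    have hc : c = '-' := by simpa using h2
    subst hc; simp [gfsGo, List.count_singleton]
  | case4 c h1 h2 => simp [gfsGo, List.count_singleton, h1, h2]
  | case5 c1 c2 rest _l ih1 ih2 =>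
    rw [gfsGo]
    simp only at ih1 ih2 ⊢
    rw [ih1, ih2]
    have h := List.take_append_drop ((c1 :: c2 :: rest).length / 2) (c1 :: c2 :: rest)
    have hp := congrArg (List.count '+') h
    have hm := congrArg (List.count '-') h
    rw [List.count_append] at hp hm
    push_cast [← hp, ← hm]
    ring

-- ===== VERDICT (by name: the statement is the Claim_ definition above) =====
theorem getfinalstep_spec : Claim_equal_getfinalstep := by
  intro steps _
  unfold Spec_getfinalstep getfinalstep getfinalstep_alt
  rw [foldl_pm, gfsGo_eq_counts]
  ring
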